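-- pv_equiv track=rewrite | github.com/ignaziopr/parity-rnn-state-merging | src/state_merge_analysis.py | get_all_continuations
-- ===== SOURCE A (Python) =====
-- def get_all_continuations(prefix, continuation_length):
--     """Get all possible continuations of a given prefix up to continuation_length"""
--     continuations = []
--     for length in range(1, continuation_length + 1):
--         for i in range(2**length):
--             continuation = [(i >> j) & 1 for j in range(length-1, -1, -1)]
--             full_sequence = prefix + continuation
--             parity = sum(full_sequence) % 2
--             continuations.append((continuation, parity))
--     return continuations
-- ===== SOURCE B (Python) =====
-- def get_all_continuations(prefix, continuation_length):
--     """Get all possible continuations of a given prefix up to continuation_length"""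
--     frontier = [([], sum(prefix) % 2)]
--     results = []
--     for _ in range(continuation_length):
--         next_frontier = []
--         for seq, par in frontier:
--             next_frontier.append((seq + [0], par % 2))
--             next_frontier.append((seq + [1], (par + 1) % 2))
--         frontier = next_frontier
--         results.extend(next_frontier)
--     return results
-- ===== Notes on version B (the rewrite author's own statement) =====
-- stated objective: alternative
-- what changed: Replaces per-item bit extraction from an integer index and a full sum over prefix+continuation with a level-by-level frontier that extends each previous sequence by 0/1 and carries the parity incrementally.
import Mathlib
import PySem

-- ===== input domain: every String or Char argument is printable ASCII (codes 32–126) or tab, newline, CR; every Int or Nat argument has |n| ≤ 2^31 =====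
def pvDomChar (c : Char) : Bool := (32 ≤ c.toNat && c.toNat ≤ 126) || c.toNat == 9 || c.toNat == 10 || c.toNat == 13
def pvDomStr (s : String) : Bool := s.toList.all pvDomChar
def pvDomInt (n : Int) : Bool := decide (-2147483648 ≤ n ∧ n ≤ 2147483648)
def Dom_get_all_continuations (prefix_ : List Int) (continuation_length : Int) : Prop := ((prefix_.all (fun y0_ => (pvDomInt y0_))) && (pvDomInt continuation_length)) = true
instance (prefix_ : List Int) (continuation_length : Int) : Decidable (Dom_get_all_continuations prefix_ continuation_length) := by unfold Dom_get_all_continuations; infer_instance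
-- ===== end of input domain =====

-- B replaces A's per-item bit extraction + full-sequence sum with a frontier that
-- extends each previous-level sequence by 0/1 and carries parity incrementally
-- (objective: alternative decomposition of the same enumeration).

-- ===== PORT A =====
def get_all_continuations (prefix_ : List Int) (continuation_length : Int) : List (List Int × Int) :=
  (PySem.List.pyRange 1 (continuation_length + 1) 1).foldl (fun continuations length =>
    (PySem.List.pyRange 0 ((2 : Int) ^ length.toNat) 1).foldl (fun acc i =>
      let continuation := (PySem.List.pyRange (length - 1) (-1) (-1)).map
        (fun j => PySem.Int.band (i >>> j.toNat) 1)
      let full_sequence := prefix_ ++ continuation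
      let parity := PySem.Int.mod full_sequence.sum 2
      acc ++ [(continuation, parity)]) continuations) []

-- ===== PORT B =====
-- one level step: children of every frontier entry, in order
def pvStepB (frontier : List (List Int × Int)) : List (List Int × Int) :=
  frontier.foldl (fun nf sp =>
    nf ++ [(sp.1 ++ [0], PySem.Int.mod sp.2 2), (sp.1 ++ [1], PySem.Int.mod (sp.2 + 1) 2)]) []

def pvGoB : Nat → List (List Int × Int) → List (List Int × Int) → List (List Int × Int)
  | 0, _, results => results
  | k + 1, frontier, results =>
    let nf := pvStepB frontier
    pvGoB k nf (results ++ nf)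

def get_all_continuations_alt (prefix_ : List Int) (continuation_length : Int) : List (List Int × Int) :=
  pvGoB continuation_length.toNat [([], PySem.Int.mod prefix_.sum 2)] []

-- ===== PRECONDITION & SPEC =====
def Spec_get_all_continuations (prefix_ : List Int) (continuation_length : Int) (out : List (List Int × Int)) : Prop := out = get_all_continuations_alt prefix_ continuation_length
instance (prefix_ : List Int) (continuation_length : Int) (out : List (List Int × Int)) : Decidable (Spec_get_all_continuations prefix_ continuation_length out) := by unfold Spec_get_all_continuations; infer_instance

-- ===== CLAIM (what is proved, stated in full; the proofs are below) =====
def Claim_equal_get_all_continuations : Prop := ∀ (prefix_ : List Int) (continuation_length : Int), Dom_get_all_continuations prefix_ continuation_length → Spec_get_all_continuations prefix_ continuation_length (get_all_continuations prefix_ continuation_length)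

-- ===== LEMMAS AND PROOFS =====

-- MSB-first bits of i, width n
def pvBits (n i : Nat) : List Int :=
  (List.range n).map (fun k => (((i >>> (n - 1 - k)) &&& 1 : Nat) : Int))

-- the block of items emitted for one continuation length n
def pvBlk (prefix_ : List Int) (n : Nat) : List (List Int × Int) :=
  (List.range (2 ^ n)).map
    (fun i => (pvBits n i, PySem.Int.mod (prefix_ ++ pvBits n i).sum 2))

theorem pv_shift_step (i b j : Nat) (hb : b < 2) : (2 * i + b) >>> (j + 1) = i >>> j := by
  simp only [Nat.shiftRight_eq_div_pow, pow_succ]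
  rw [Nat.mul_comm (2 ^ j) 2, ← Nat.div_div_eq_div_mul]
  congr 1
  omega

theorem pvBits_step (n i b : Nat) (hb : b < 2) :
    pvBits (n + 1) (2 * i + b) = pvBits n i ++ [(b : Int)] := by
  simp only [pvBits, List.range_succ, List.map_append, List.map_cons, List.map_nil]
  congr 1
  · apply List.map_congr_left
    intro k hk
    simp only [List.mem_range] at hk
    have h1 : n + 1 - 1 - k = (n - 1 - k) + 1 := by omega
    rw [h1, pv_shift_step _ _ _ hb]
  · have h0 : n + 1 - 1 - n = 0 := by omega
    simp only [h0, Nat.shiftRight_zero, Nat.and_one_is_mod, List.cons.injEq, and_true]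
    congr 1
    omega

theorem pvRange_double (m : Nat) :
    List.range (2 * m) = (List.range m).flatMap (fun i => [2 * i, 2 * i + 1]) := by
  induction m with
  | zero => simp
  | succ m ih =>
    have h : 2 * (m + 1) = (2 * m + 1) + 1 := by omega
    rw [h, List.range_succ, List.range_succ, List.range_succ, List.flatMap_append, ← ih]
    simp

theorem pv_band_cast (m j : Nat) :
    PySem.Int.band ((m : Int) >>> j) 1 = ((m >>> j &&& 1 : Nat) : Int) := by
  rw [show ((m : Int) >>> j) = ((m >>> j : Nat) : Int) from rfl, PySem.Int.band_one,
    show (2 : Int) = ((2 : Nat) : Int) from rfl, PySem.Int.mod_natCast, Nat.and_one_is_mod]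

theorem pv_pair_eq (prefix_ c : List Int) (n m : Nat) (h : c = pvBits n m) :
    (c, PySem.Int.mod (prefix_ ++ c).sum 2)
      = (pvBits n m, PySem.Int.mod (prefix_ ++ pvBits n m).sum 2) := by
  rw [h]

theorem pv_foldl_blk (prefix_ : List Int)
    (F : List (List Int × Int) → Nat → List (List Int × Int))
    (hF : ∀ acc t, F acc t = acc ++ pvBlk prefix_ (1 + t)) :
    ∀ (l : List Nat) (acc : List (List Int × Int)),
      l.foldl F acc = acc ++ l.flatMap (fun t => pvBlk prefix_ (1 + t)) := by
  intro l
  induction l with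
  | nil => intro acc; simp
  | cons t l ih =>
    intro acc
    simp only [List.foldl_cons, List.flatMap_cons, hF]
    rw [ih]
    simp [List.append_assoc]

-- B's step sends level n to level n+1
theorem pvStepB_blk (prefix_ : List Int) (n : Nat) :
    pvStepB (pvBlk prefix_ n) = pvBlk prefix_ (n + 1) := by
  unfold pvStepB
  rw [show (fun (nf : List (List Int × Int)) (sp : List Int × Int) =>
        nf ++ [(sp.1 ++ [0], PySem.Int.mod sp.2 2), (sp.1 ++ [1], PySem.Int.mod (sp.2 + 1) 2)])
      = (fun nf sp => nf ++ (fun (sp : List Int × Int) =>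
        [(sp.1 ++ [0], PySem.Int.mod sp.2 2), (sp.1 ++ [1], PySem.Int.mod (sp.2 + 1) 2)]) sp)
      from rfl,
    PySem.List.foldl_append_eq_flatMap, List.nil_append, pvBlk, pvBlk, pow_succ,
    Nat.mul_comm, pvRange_double, List.map_flatMap, List.flatMap_map]
  apply List.flatMap_congr
  intro i hi
  have h0 : pvBits (n + 1) (2 * i) = pvBits n i ++ [(0 : Int)] := by
    have := pvBits_step n i 0 (by omega); simpa using this
  have h1 : pvBits (n + 1) (2 * i + 1) = pvBits n i ++ [(1 : Int)] := by
    exact pvBits_step n i 1 (by omega)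
  have hm : ∀ x : Int, PySem.Int.mod x 2 = x % 2 := fun x =>
    PySem.Int.mod_eq_emod_of_pos (by omega)
  simp only [List.map_cons, List.map_nil, h0, h1, hm, List.cons.injEq,
    Prod.mk.injEq]
  refine ⟨⟨trivial, ?_⟩, ⟨trivial, ?_⟩, trivial⟩ <;>
  · simp only [← List.append_assoc, List.sum_append, List.sum_cons, List.sum_nil]
    omega

theorem pvGoB_blk (prefix_ : List Int) (k : Nat) :
    ∀ (n : Nat) (res : List (List Int × Int)),
    pvGoB k (pvBlk prefix_ n) res
      = res ++ (List.range k).flatMap (fun t => pvBlk prefix_ (n + 1 + t)) := by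
  induction k with
  | zero => intro n res; simp [pvGoB]
  | succ k ih =>
    intro n res
    simp only [pvGoB, pvStepB_blk]
    rw [ih (n + 1), List.range_succ_eq_map, List.flatMap_cons, List.flatMap_map,
      List.append_assoc]
    have he : ∀ t ∈ List.range k, pvBlk prefix_ (n + 1 + 1 + t) = pvBlk prefix_ (n + 1 + (t + 1)) := by
      intro t _
      congr 1
      omega
    rw [List.flatMap_congr he]

theorem pvAltEq (prefix_ : List Int) (L : Int) :
    get_all_continuations_alt prefix_ L
      = (List.range L.toNat).flatMap (fun t => pvBlk prefix_ (1 + t)) := by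
  unfold get_all_continuations_alt
  have h0 : [(([] : List Int), PySem.Int.mod prefix_.sum 2)] = pvBlk prefix_ 0 := by
    simp [pvBlk, pvBits]
  rw [h0, pvGoB_blk prefix_ L.toNat 0]
  simp

theorem pvAEq (prefix_ : List Int) (L : Int) :
    get_all_continuations prefix_ L
      = (List.range L.toNat).flatMap (fun t => pvBlk prefix_ (1 + t)) := by
  unfold get_all_continuations
  rw [PySem.List.pyRange_one]
  have hl : (L + 1 - 1).toNat = L.toNat := by omega
  rw [hl, List.foldl_map]
  refine Eq.trans (pv_foldl_blk prefix_ _ ?_ (List.range L.toNat) []) (List.nil_append _)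
  intro acc t
  have hc : (1 : Int) + (t : Int) = ((1 + t : Nat) : Int) := by push_cast; ring
  simp only [hc]
  generalize 1 + t = n
  rw [PySem.List.foldl_append_singleton_eq_map]
  congr 1
  have h2 : (2 : Int) ^ ((n : Int)).toNat = ((2 ^ n : Nat) : Int) := by
    simp
  rw [h2, PySem.List.pyRange_zero_nat, List.map_map]
  simp only [pvBlk]
  apply List.map_congr_left
  intro m hm
  simp only [Function.comp]
  refine pv_pair_eq prefix_ _ n m ?_
  rw [PySem.List.pyRange_neg_one]
  have hl3 : ((n : Int) - 1 - (-1)).toNat = n := by omega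
  rw [hl3, List.map_map, pvBits]
  apply List.map_congr_left
  intro k hk
  simp only [List.mem_range] at hk
  have hk2 : ((n : Int) - 1 - (k : Int)).toNat = n - 1 - k := by omega
  simp only [Function.comp, hk2]
  exact pv_band_cast m (n - 1 - k)

-- ===== VERDICT (by name: the statement is the Claim_ definition above) =====
theorem get_all_continuations_spec : Claim_equal_get_all_continuations := by
  intro prefix_ L _
  unfold Spec_get_all_continuations
  rw [pvAEq, pvAltEq]
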